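-- pv_equiv track=rewrite | github.com/Sandman13sq/DmrBlenderTools | findopnames.py | ParseQuote
-- ===== SOURCE A (Python) =====
-- def ParseQuote(l, newchar):
--     qchar = 0
--     qpos = -1
--     l = [x for x in l]
--
--     for i,c in enumerate(l):
--         if qchar == 0:
--             if c == '"' or c == "'":
--                 qchar = c
--                 qpos = i
--         else:
--             if c == qchar:
--                 l[i] = newchar
--                 l[qpos] = newchar
--                 qchar = 0
--
--     return ''.join(l)
-- ===== SOURCE B (Python) =====
-- def ParseQuote(l, newchar):
--     # Jump between quotes with str.find(ch, start) and assemble the output from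
--     # whole slices; no per-character loop, no quote-state machine. The next
--     # occurrence of each quote char is cached and only re-searched past p.
--     parts = []
--     p = 0
--     i1 = l.find('"')
--     i2 = l.find("'")
--     while True:
--         if i1 != -1 and i1 < p:
--             i1 = l.find('"', p)
--         if i2 != -1 and i2 < p:
--             i2 = l.find("'", p)
--         cands = [k for k in (i1, i2) if k != -1]
--         if not cands:
--             break
--         i = min(cands)
--         q = l[i]
--         j = l.find(q, i + 1)
--         if j == -1:
--             break
--         parts.append(l[p:i])
--         parts.append(newchar)
--         parts.append(l[i + 1:j])
--         parts.append(newchar)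
--         p = j + 1
--     return ''.join(parts) + l[p:]
-- ===== Notes on version B (the rewrite author's own statement) =====
-- stated objective: faster
-- what changed: Instead of A's per-character loop with qchar/qpos state registers mutating a char array, B never visits characters one at a time: it jumps between quotes with str.find(ch, start) (caching each quote char's next occurrence) and assembles the result from whole string slices plus the replacement char.
import Mathlib
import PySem

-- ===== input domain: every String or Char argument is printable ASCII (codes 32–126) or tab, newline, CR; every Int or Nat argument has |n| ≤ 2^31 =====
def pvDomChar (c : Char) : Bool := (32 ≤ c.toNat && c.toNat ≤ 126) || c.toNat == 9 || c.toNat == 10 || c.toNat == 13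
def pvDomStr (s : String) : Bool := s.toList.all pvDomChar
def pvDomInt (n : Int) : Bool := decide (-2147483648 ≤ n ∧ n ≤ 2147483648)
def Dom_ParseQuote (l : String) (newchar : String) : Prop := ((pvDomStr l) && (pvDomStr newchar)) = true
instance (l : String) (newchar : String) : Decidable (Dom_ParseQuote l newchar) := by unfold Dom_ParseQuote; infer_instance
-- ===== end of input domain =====

-- B replaces A's per-character qchar/qpos state machine by str.find jumps: it locates the next
-- quote of either kind (cached next occurrences), finds its closing partner, and assembles the
-- output from whole slices (measurably faster: C-level find/slicing instead of a Python
-- per-character loop); same return value on every input (A does not mutate its argument).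

-- ===== PORT A =====
-- A's for-loop: `i` the enumerate index, `arr` the mutable list (1-char strings as List Char,
-- overwritten with newchar via List.set, exactly `l[i] = newchar`), `qchar`/`qpos` the two state
-- registers (qchar = 0 ↦ none; qpos = -1 is never read before being set, start at 0).
def parseQuoteLoopA (nc : List Char) : List Char → Nat → List (List Char) → Option Char → Nat → List (List Char)
  | [], _, arr, _, _ => arr
  | c :: rest, i, arr, qchar, qpos =>
    match qchar with
    | none =>
      if c = '"' ∨ c = '\'' then parseQuoteLoopA nc rest (i+1) arr (some c) i
      else parseQuoteLoopA nc rest (i+1) arr none qpos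
    | some q =>
      if c = q then parseQuoteLoopA nc rest (i+1) ((arr.set i nc).set qpos nc) none qpos
      else parseQuoteLoopA nc rest (i+1) arr (some q) qpos

def ParseQuote (l : String) (newchar : String) : String :=
  String.ofList (PySem.Chars.join [] (parseQuoteLoopA newchar.toList l.toList 0 (l.toList.map (fun c => [c])) none 0))

-- ===== PORT B =====
-- Source B's while-loop: `p` the output cursor, `i1`/`i2` the cached next occurrences of '"'/'\''
-- (re-searched with l.find(ch, p) only once the cache falls behind p), `parts` the collected
-- slices.  `fuel` only makes the recursion structural: the top-level call passes
-- l.length + 1 and p grows by at least 2 per iteration, so fuel never runs out there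
-- (the fuel-0 branch repeats the loop's break result).
def pqRun (cs : List Char) (nc : List Char) : Nat → Nat → Int → Int → List (List Char) → List Char
  | 0, p, _, _, parts => PySem.Chars.join [] parts ++ PySem.List.slice cs (some (p : Int)) none
  | fuel+1, p, i1, i2, parts =>
    let i1' := if i1 ≠ -1 ∧ i1 < (p : Int) then PySem.Chars.findFrom cs ['"'] (p : Int) none else i1
    let i2' := if i2 ≠ -1 ∧ i2 < (p : Int) then PySem.Chars.findFrom cs ['\''] (p : Int) none else i2
    let cands := [i1', i2'].filter (fun k => k != -1)
    match PySem.List.min? cands (fun k => k) with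
    | none => PySem.Chars.join [] parts ++ PySem.List.slice cs (some (p : Int)) none
    | some i =>
      -- q := l[i]; exact: whenever this branch is reached from the top-level call, 0 ≤ i < cs.length
      let q := cs.getD i.toNat ' '
      let j := PySem.Chars.findFrom cs [q] (i+1) none
      if j = -1 then PySem.Chars.join [] parts ++ PySem.List.slice cs (some (p : Int)) none
      else pqRun cs nc fuel (j+1).toNat i1' i2'
        (parts ++ [PySem.List.slice cs (some (p : Int)) (some i), nc,
                   PySem.List.slice cs (some (i+1)) (some j), nc])

def ParseQuote_alt (l : String) (newchar : String) : String :=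
  String.ofList (pqRun l.toList newchar.toList (l.toList.length + 1) 0
    (PySem.Chars.find l.toList ['"']) (PySem.Chars.find l.toList ['\'']) [])

-- ===== PRECONDITION & SPEC =====
def Spec_ParseQuote (l : String) (newchar : String) (out : String) : Prop := out = ParseQuote_alt l newchar
instance (l : String) (newchar : String) (out : String) : Decidable (Spec_ParseQuote l newchar out) := by unfold Spec_ParseQuote; infer_instance

-- ===== CLAIM (what is proved, stated in full; the proofs are below) =====
def Claim_equal_ParseQuote : Prop := ∀ (l : String) (newchar : String), Dom_ParseQuote l newchar → Spec_ParseQuote l newchar (ParseQuote l newchar)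

-- ===== LEMMAS AND PROOFS =====

-- first index (if any) of the closing quote, splitting the list there (proof-side reference)
def pqFindSplit (q : Char) : List Char → Option (List Char × List Char)
  | [] => none
  | c :: rest =>
    if c = q then some ([], rest)
    else
      match pqFindSplit q rest with
      | none => none
      | some (b, a) => some (c :: b, a)

theorem pqFindSplit_length {q : Char} : ∀ {l b a : List Char},
    pqFindSplit q l = some (b, a) → a.length < l.length := by
  intro l
  induction l with
  | nil => intro b a h; simp [pqFindSplit] at h
  | cons c rest ih =>
    intro b a h
    simp only [pqFindSplit] at h
    split at h
    · cases h; simp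
    · cases hr : pqFindSplit q rest with
      | none => rw [hr] at h; cases h
      | some p =>
        rw [hr] at h
        cases p with
        | mk b' a' =>
          cases h
          exact Nat.lt_succ_of_lt (ih hr)

-- structural reference result, as a list of pieces: matched pairs become nc … nc, an
-- unmatched opening quote freezes the remaining suffix
def pqChunks (nc : List Char) : List Char → List (List Char)
  | [] => []
  | c :: rest =>
    if c = '"' ∨ c = '\'' then
      match h : pqFindSplit c rest with
      | none => [c] :: rest.map (fun x => [x])
      | some (b, a) =>
        nc :: b.map (fun x => [x]) ++ nc :: pqChunks nc a
    else [c] :: pqChunks nc rest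
termination_by l => l.length
decreasing_by
  · exact Nat.lt_succ_of_lt (pqFindSplit_length h)
  · simp

theorem pq_set_append_length {α : Type} (xs : List α) (y v : α) (ys : List α) :
    (xs ++ y :: ys).set xs.length v = xs ++ v :: ys := by
  induction xs with
  | nil => simp
  | cons x xs ih => simp [List.set, ih]

def pqSing (c : Char) : List Char := [c]

theorem pq_chunks_nil (nc : List Char) : pqChunks nc [] = [] := by
  rw [pqChunks]

theorem pq_chunks_quote_none (nc : List Char) (c : Char) (rest : List Char)
    (hq : c = '"' ∨ c = '\'') (hfs : pqFindSplit c rest = none) :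
    pqChunks nc (c :: rest) = pqSing c :: rest.map pqSing := by
  rw [pqChunks, if_pos hq]
  split <;> simp_all [pqSing]

theorem pq_chunks_quote_some (nc : List Char) (c : Char) (rest b a : List Char)
    (hq : c = '"' ∨ c = '\'') (hfs : pqFindSplit c rest = some (b, a)) :
    pqChunks nc (c :: rest)
      = nc :: b.map pqSing ++ nc :: pqChunks nc a := by
  rw [pqChunks, if_pos hq]
  split <;> simp_all [pqSing]

theorem pq_chunks_nonquote (nc : List Char) (c : Char) (rest : List Char)
    (hq : ¬ (c = '"' ∨ c = '\'')) :
    pqChunks nc (c :: rest) = pqSing c :: pqChunks nc rest := by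
  rw [pqChunks]
  simp [hq, pqSing]

-- A-side invariant, both loop states at once, strong induction on the suffix length
theorem pq_loop_inv (nc : List Char) (n : Nat) :
    (∀ (rest : List Char) (pre : List (List Char)) (qpos : Nat), rest.length ≤ n →
      parseQuoteLoopA nc rest pre.length (pre ++ rest.map pqSing) none qpos
        = pre ++ pqChunks nc rest)
    ∧
    (∀ (rest mids : List Char) (pre : List (List Char)) (q : Char), rest.length ≤ n →
      q ∉ mids →
      parseQuoteLoopA nc rest (pre.length + 1 + mids.length)
          (pre ++ pqSing q :: mids.map pqSing ++ rest.map pqSing) (some q) pre.length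
        = match pqFindSplit q rest with
          | none => pre ++ pqSing q :: mids.map pqSing ++ rest.map pqSing
          | some (b, a) =>
              pre ++ nc :: mids.map pqSing ++ b.map pqSing ++ nc :: pqChunks nc a) := by
  induction n with
  | zero =>
    constructor
    · intro rest pre qpos hlen
      have : rest = [] := List.length_eq_zero_iff.mp (Nat.le_zero.mp hlen)
      subst this
      simp [parseQuoteLoopA, pq_chunks_nil]
    · intro rest mids pre q hlen _
      have : rest = [] := List.length_eq_zero_iff.mp (Nat.le_zero.mp hlen)
      subst this
      simp [parseQuoteLoopA, pqFindSplit]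
  | succ n ih =>
    have ih1 := ih.1
    have ih2 := ih.2
    constructor
    · intro rest pre qpos hlen
      cases rest with
      | nil => simp [parseQuoteLoopA, pq_chunks_nil]
      | cons c rest' =>
        simp only [List.length_cons, Nat.succ_le_succ_iff] at hlen
        by_cases hq : c = '"' ∨ c = '\''
        · simp only [List.map_cons, parseQuoteLoopA, if_pos hq]
          have h2 := ih2 rest' [] pre c (by omega) (by simp)
          simp only [List.map_nil, List.nil_append, Nat.add_zero, List.length_nil,
            List.cons_append, List.singleton_append, List.append_assoc] at h2
          rw [h2]
          cases hfs : pqFindSplit c rest' with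
          | none => simp [pq_chunks_quote_none nc c rest' hq hfs]
          | some p =>
            obtain ⟨b, a⟩ := p
            simp [pq_chunks_quote_some nc c rest' b a hq hfs]
        · simp only [List.map_cons, parseQuoteLoopA, if_neg hq]
          have h1 := ih1 rest' (pre ++ [pqSing c]) qpos (by omega)
          rw [pq_chunks_nonquote nc c rest' hq]
          simpa [List.append_assoc] using h1
    · intro rest mids pre q hlen hnot
      cases rest with
      | nil => simp [parseQuoteLoopA, pqFindSplit]
      | cons c rest' =>
        simp only [List.length_cons, Nat.succ_le_succ_iff] at hlen
        by_cases hc : c = q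
        · subst hc
          simp only [List.map_cons, parseQuoteLoopA, eq_self_iff_true, if_true,
            List.cons_append, List.append_assoc]
          rw [show pre ++ pqSing c :: (mids.map pqSing ++ pqSing c :: rest'.map pqSing)
              = (pre ++ pqSing c :: mids.map pqSing) ++ pqSing c :: rest'.map pqSing from by simp]
          rw [show pre.length + 1 + mids.length = (pre ++ pqSing c :: mids.map pqSing).length
              from by simp; omega]
          rw [pq_set_append_length]
          rw [show (pre ++ pqSing c :: mids.map pqSing) ++ nc :: rest'.map pqSing
              = pre ++ pqSing c :: (mids.map pqSing ++ nc :: rest'.map pqSing) from by simp]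
          rw [pq_set_append_length pre (pqSing c) nc _]
          have h1 := ih1 rest' (pre ++ nc :: mids.map pqSing ++ [nc]) pre.length
            (by omega)
          rw [show (pre ++ nc :: mids.map pqSing ++ [nc]).length
              = (pre ++ pqSing c :: mids.map pqSing).length + 1 from by simp; omega] at h1
          simp only [List.append_assoc, List.cons_append, List.singleton_append,
            List.nil_append] at h1
          rw [h1]
          rw [show pqFindSplit c (c :: rest') = some ([], rest') from by simp [pqFindSplit]]
          simp [List.append_assoc]
        · simp only [List.map_cons, parseQuoteLoopA, if_neg hc]
          have h2 := ih2 rest' (mids ++ [c]) pre q (by omega)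
            (by simp [hnot]; exact fun h => hc h.symm)
          have harr : pre ++ pqSing q :: (mids ++ [c]).map pqSing ++ rest'.map pqSing
              = pre ++ pqSing q :: mids.map pqSing ++ pqSing c :: rest'.map pqSing := by
            simp [List.append_assoc]
          have hidx : pre.length + 1 + (mids ++ [c]).length
              = pre.length + 1 + mids.length + 1 := by simp; omega
          rw [harr, hidx] at h2
          rw [h2]
          have hfs : pqFindSplit q (c :: rest')
              = match pqFindSplit q rest' with
                | none => none
                | some (b, a) => some (c :: b, a) := by
            simp [pqFindSplit, hc]
          rw [hfs]
          cases hr : pqFindSplit q rest' with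
          | none => simp [List.append_assoc]
          | some p =>
            obtain ⟨b, a⟩ := p
            simp [List.append_assoc]

-- ''.join on char-list pieces is flatten
theorem pq_join_nil_eq_flatten : ∀ (L : List (List Char)), PySem.Chars.join [] L = L.flatten := by
  intro L
  induction L with
  | nil => rfl
  | cons a M ih =>
    cases M with
    | nil => simp [PySem.Chars.join, List.intercalate]
    | cons b M' =>
      simp only [PySem.Chars.join, List.intercalate, List.intersperse] at *
      simp only [List.flatten_cons, List.nil_append] at *
      rw [ih]

-- flattened reference result
def pqS (nc : List Char) (xs : List Char) : List Char := (pqChunks nc xs).flatten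

-- === findIdx? toolkit ===

theorem pq_fi_drop_none {p : Char → Bool} {xs : List Char} (d : Nat)
    (h : List.findIdx? p xs = none) : List.findIdx? p (xs.drop d) = none := by
  rw [List.findIdx?_eq_none_iff] at h ⊢
  exact fun x hx => h x (List.mem_of_mem_drop hx)

theorem pq_fi_drop_some {p : Char → Bool} : ∀ (d : Nat) {xs : List Char} {t : Nat},
    List.findIdx? p xs = some t → d ≤ t → List.findIdx? p (xs.drop d) = some (t - d) := by
  intro d
  induction d with
  | zero => intro xs t h _; simpa using h
  | succ d ih =>
    intro xs t h hd
    cases xs with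
    | nil => simp [List.findIdx?_nil] at h
    | cons x xs' =>
      rw [List.findIdx?_cons] at h
      split at h
      · cases h; omega
      · cases hx : List.findIdx? p xs' with
        | none => rw [hx] at h; cases h
        | some t' =>
          rw [hx, Option.map_some] at h
          have ht : t = t' + 1 := by simpa using h.symm
          subst ht
          have := ih hx (by omega)
          simpa [Nat.succ_sub_succ] using this

theorem pq_fi_some_split {p : Char → Bool} : ∀ {xs : List Char} {t : Nat},
    List.findIdx? p xs = some t →
    ∃ x, xs.take t ++ x :: xs.drop (t+1) = xs ∧ (xs.take t).length = t ∧ p x = true ∧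
      ∀ y ∈ xs.take t, p y = false := by
  intro xs
  induction xs with
  | nil => intro t h; simp [List.findIdx?_nil] at h
  | cons x xs' ih =>
    intro t h
    rw [List.findIdx?_cons] at h
    split at h
    · cases h
      exact ⟨x, by simp, by simp, by assumption, by simp⟩
    · cases hx : List.findIdx? p xs' with
      | none => rw [hx] at h; cases h
      | some t' =>
        rw [hx] at h
        cases h
        obtain ⟨y, hy1, hy2, hy3, hy4⟩ := ih hx
        refine ⟨y, ?_, ?_, hy3, ?_⟩
        · simpa using hy1
        · simpa using hy2
        · intro z hz
          simp only [List.take_succ_cons, List.mem_cons] at hz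
          rcases hz with rfl | hz
          · simpa using ‹¬ p z = true›
          · exact hy4 z hz

-- Python's s.find(q) for a single char, as findIdx?
theorem pq_find_single (cs : List Char) (q : Char) :
    PySem.Chars.find cs [q]
      = match List.findIdx? (fun x => x == q) cs with
        | none => -1
        | some t => (t : Int) := by
  cases hf : List.findIdx? (fun x => x == q) cs with
  | none =>
    rw [List.findIdx?_eq_none_iff] at hf
    refine (PySem.Chars.find_eq_neg_one_iff cs [q]).mpr ?_
    rw [List.singleton_infix_iff]
    intro hq
    simpa using hf q hq
  | some t =>
    obtain ⟨x, hdec, hlen, hx, hfree⟩ := pq_fi_some_split hf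
    have hxq : x = q := by simpa using hx
    subst hxq
    have hmem : x ∈ cs := by rw [← hdec]; simp
    have h0 : 0 ≤ PySem.Chars.find cs [x] := by
      rw [PySem.Chars.find_nonneg_iff, List.singleton_infix_iff]; exact hmem
    obtain ⟨hpre, hmin⟩ := PySem.Chars.find_spec h0
    have hdropt : cs.drop t = x :: cs.drop (t+1) := by
      have h2 := List.drop_left (l₁ := cs.take t) (l₂ := x :: cs.drop (t+1))
      rw [hlen, hdec] at h2
      exact h2
    have hle : (PySem.Chars.find cs [x]).toNat ≤ t := by
      by_contra hlt
      exact hmin t (by omega) (by rw [hdropt]; exact ⟨_, rfl⟩)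
    have hge : ¬ (PySem.Chars.find cs [x]).toNat < t := by
      intro hlt
      obtain ⟨tail, htail⟩ := hpre
      have hget : cs[(PySem.Chars.find cs [x]).toNat]? = some x := by
        have : (cs.drop (PySem.Chars.find cs [x]).toNat)[0]? = some x := by
          rw [← htail]; rfl
        simpa [List.getElem?_drop] using this
      have hmemtake : x ∈ cs.take t := by
        have : (cs.take t)[(PySem.Chars.find cs [x]).toNat]? = some x := by
          rw [List.getElem?_take_of_lt hlt]; exact hget
        exact List.mem_of_getElem? this
      simpa using hfree x hmemtake
    have heq : (PySem.Chars.find cs [x]).toNat = t := by omega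
    have h1 := Int.toNat_of_nonneg h0
    rw [heq] at h1
    exact h1.symm

-- the next occurrence of q at or after position p, as Source B's find returns it
def pqIdx (q : Char) (cs : List Char) (p : Nat) : Int :=
  match List.findIdx? (fun x => x == q) (cs.drop p) with
  | none => -1
  | some t => ((p + t : Nat) : Int)

theorem pq_findFrom_eq_pqIdx (cs : List Char) (q : Char) (p : Nat) (hp : p ≤ cs.length) :
    PySem.Chars.findFrom cs [q] (p : Int) none = pqIdx q cs p := by
  rw [PySem.Chars.findFrom_natCast cs [q] p hp, pq_find_single (cs.drop p) q]
  unfold pqIdx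
  cases hf : List.findIdx? (fun x => x == q) (cs.drop p) with
  | none => simp
  | some t =>
    have hne : ((t : Int) = -1) = False := by simp
    simp only [hne, if_false]
    push_cast
    ring

theorem pq_find_eq_pqIdx (cs : List Char) (q : Char) :
    PySem.Chars.find cs [q] = pqIdx q cs 0 := by
  rw [pq_find_single]
  unfold pqIdx
  simp

-- cache refresh: a value of pqIdx taken at any earlier start, refreshed as Source B does, is pqIdx at p
theorem pq_refresh (q : Char) (cs : List Char) (p : Nat) (i : Int) (hp : p ≤ cs.length)
    (h : ∃ s, s ≤ p ∧ i = pqIdx q cs s) :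
    (if i ≠ -1 ∧ i < (p : Int) then PySem.Chars.findFrom cs [q] (p : Int) none else i)
      = pqIdx q cs p := by
  obtain ⟨s, hs, rfl⟩ := h
  have hdd : (cs.drop s).drop (p - s) = cs.drop p := by
    rw [List.drop_drop]
    congr 1
    omega
  cases hfs : List.findIdx? (fun x => x == q) (cs.drop s) with
  | none =>
    have hp2 : List.findIdx? (fun x => x == q) (cs.drop p) = none := by
      rw [← hdd]; exact pq_fi_drop_none _ hfs
    simp [pqIdx, hfs, hp2]
  | some t =>
    simp only [pqIdx, hfs]
    by_cases hlt : s + t < p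
    · rw [if_pos ⟨by simp; omega, by exact_mod_cast hlt⟩]
      rw [pq_findFrom_eq_pqIdx cs q p hp]
      unfold pqIdx
      rfl
    · rw [if_neg (by push_cast; omega)]
      have hp2 : List.findIdx? (fun x => x == q) (cs.drop p) = some (t - (p - s)) := by
        rw [← hdd]; exact pq_fi_drop_some _ hfs (by omega)
      simp only [pqIdx, hp2]
      congr 1
      omega

-- first index of either quote char = combination of the two single-char searches
theorem pq_fi_or : ∀ (xs : List Char),
    List.findIdx? (fun c => c == '"' || c == '\'') xs
      = match List.findIdx? (fun x => x == '"') xs, List.findIdx? (fun x => x == '\'') xs with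
        | none, none => none
        | some t, none => some t
        | none, some u => some u
        | some t, some u => some (min t u) := by
  intro xs
  induction xs with
  | nil => simp
  | cons c r ih =>
    rw [List.findIdx?_cons, List.findIdx?_cons, List.findIdx?_cons]
    by_cases h1 : c = '"'
    · cases h2 : List.findIdx? (fun x => x == '\'') r <;> simp [h1]
    · by_cases h2 : c = '\''
      · cases h3 : List.findIdx? (fun x => x == '"') r <;> simp [h1, h2]
      · rw [ih]
        cases h3 : List.findIdx? (fun x => x == '"') r <;>
          cases h4 : List.findIdx? (fun x => x == '\'') r <;>
            simp [h1, h2, Nat.succ_min_succ]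

theorem pq_findSplit_eq (q : Char) : ∀ (xs : List Char),
    pqFindSplit q xs
      = match List.findIdx? (fun x => x == q) xs with
        | none => none
        | some t => some (xs.take t, xs.drop (t+1)) := by
  intro xs
  induction xs with
  | nil => simp [pqFindSplit]
  | cons c r ih =>
    rw [List.findIdx?_cons]
    by_cases hc : c = q
    · simp [pqFindSplit, hc]
    · rw [pqFindSplit, if_neg hc, ih]
      cases hr : List.findIdx? (fun x => x == q) r <;> simp [hc]

theorem pq_flatten_sing : ∀ (xs : List Char), (xs.map pqSing).flatten = xs := by
  intro xs
  induction xs with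
  | nil => rfl
  | cons z r ih => simp [pqSing, ih]

-- pqS over a quote-free prefix
theorem pq_S_prefix (nc : List Char) : ∀ (b xs : List Char),
    (∀ y ∈ b, ¬ (y = '"' ∨ y = '\'')) → pqS nc (b ++ xs) = b ++ pqS nc xs := by
  intro b
  induction b with
  | nil => simp
  | cons y b2 ih =>
    intro xs hb
    have hy := hb y (by simp)
    rw [List.cons_append]
    unfold pqS
    rw [pq_chunks_nonquote nc y (b2 ++ xs) hy]
    have hih := ih xs (fun z hz => hb z (by simp [hz]))
    unfold pqS at hih
    simp [pqSing, hih]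

theorem pq_S_quote_none (nc : List Char) (q : Char) (rest : List Char)
    (hq : q = '"' ∨ q = '\'') (hfs : pqFindSplit q rest = none) :
    pqS nc (q :: rest) = q :: rest := by
  unfold pqS
  rw [pq_chunks_quote_none nc q rest hq hfs]
  simp [List.flatten_cons, pqSing, pq_flatten_sing]

theorem pq_S_quote_some (nc : List Char) (q : Char) (rest b a : List Char)
    (hq : q = '"' ∨ q = '\'') (hfs : pqFindSplit q rest = some (b, a)) :
    pqS nc (q :: rest) = nc ++ b ++ nc ++ pqS nc a := by
  unfold pqS
  rw [pq_chunks_quote_some nc q rest b a hq hfs]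
  simp [pq_flatten_sing, List.append_assoc]

-- === main B-side invariant ===

-- one matched-pair step of pqRun, factored out of the fuel induction
theorem pq_step_some (cs nc : List Char) (fuel p : Nat) (parts : List (List Char))
    (i1' i2' : Int) (T : Nat)
    (hp : p ≤ cs.length) (hfuel : cs.length + 1 - p ≤ fuel + 1)
    (hT : List.findIdx? (fun c => c == '"' || c == '\'') (cs.drop p) = some T)
    (h1 : i1' = pqIdx '"' cs p) (h2 : i2' = pqIdx '\'' cs p)
    (IH : ∀ (p' : Nat) (i1 i2 : Int) (parts' : List (List Char)),
        p' ≤ cs.length → cs.length + 1 - p' ≤ fuel →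
        (∃ s, s ≤ p' ∧ i1 = pqIdx '"' cs s) → (∃ s, s ≤ p' ∧ i2 = pqIdx '\'' cs s) →
        pqRun cs nc fuel p' i1 i2 parts' = parts'.flatten ++ pqS nc (cs.drop p')) :
    (if PySem.Chars.findFrom cs [cs.getD (((p+T : Nat) : Int)).toNat ' '] (((p+T : Nat) : Int)+1) none = -1
     then PySem.Chars.join [] parts ++ PySem.List.slice cs (some ((p : Nat) : Int)) none
     else pqRun cs nc fuel
       ((PySem.Chars.findFrom cs [cs.getD (((p+T : Nat) : Int)).toNat ' '] (((p+T : Nat) : Int)+1) none)+1).toNat i1' i2'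
       (parts ++ [PySem.List.slice cs (some ((p : Nat) : Int)) (some ((p+T : Nat) : Int)), nc,
                  PySem.List.slice cs (some (((p+T : Nat) : Int)+1))
                    (some (PySem.Chars.findFrom cs [cs.getD (((p+T : Nat) : Int)).toNat ' '] (((p+T : Nat) : Int)+1) none)), nc]))
    = parts.flatten ++ pqS nc (cs.drop p) := by
  obtain ⟨x, hdec, hlen, hx, hfree⟩ := pq_fi_some_split hT
  have hq : x = '"' ∨ x = '\'' := by
    rcases Bool.or_eq_true_iff.mp hx with h | h
    · exact Or.inl (by simpa using h)
    · exact Or.inr (by simpa using h)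
  have hfreeP : ∀ y ∈ (cs.drop p).take T, ¬ (y = '"' ∨ y = '\'') := by
    intro y hy
    have := hfree y hy
    simp at this
    tauto
  have hlenT : T < (cs.drop p).length := by
    have hlen2 := congrArg List.length hdec
    rw [List.length_append, hlen, List.length_cons] at hlen2
    omega
  have hdlen : (cs.drop p).length = cs.length - p := by simp
  have hTp : p + T < cs.length := by omega
  have hdT : (cs.drop p).drop T = x :: (cs.drop p).drop (T+1) := by
    have h3 := List.drop_left (l₁ := (cs.drop p).take T) (l₂ := x :: (cs.drop p).drop (T+1))
    rw [hlen, hdec] at h3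
    exact h3
  have hiT : (((p+T : Nat) : Int)).toNat = p + T := by omega
  have hgetq : cs.getD (((p+T : Nat) : Int)).toNat ' ' = x := by
    rw [hiT]
    have hsome : cs[p+T]? = some x := by
      have h4 : ((cs.drop p).drop T)[0]? = some x := by rw [hdT]; rfl
      rw [List.getElem?_drop, List.getElem?_drop] at h4
      simpa using h4
    simp [List.getD, hsome]
  rw [hgetq]
  have hcast : (((p+T : Nat) : Int)+1) = ((p+T+1 : Nat) : Int) := by push_cast; ring
  have hsub : p + T + 1 ≤ cs.length := by omega
  rw [hcast, pq_findFrom_eq_pqIdx cs x (p+T+1) hsub]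
  have hdropPT : cs.drop (p+T+1) = (cs.drop p).drop (T+1) := by
    rw [List.drop_drop, Nat.add_assoc]
  cases hg : List.findIdx? (fun y => y == x) ((cs.drop p).drop (T+1)) with
  | none =>
    have hvq : pqIdx x cs (p+T+1) = -1 := by unfold pqIdx; rw [hdropPT, hg]
    rw [hvq, if_pos rfl, pq_join_nil_eq_flatten, PySem.List.slice_from_natCast]
    have hfs : pqFindSplit x ((cs.drop p).drop (T+1)) = none := by
      rw [pq_findSplit_eq, hg]
    have hSx := pq_S_quote_none nc x ((cs.drop p).drop (T+1)) hq hfs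
    have hpre := pq_S_prefix nc ((cs.drop p).take T) (x :: (cs.drop p).drop (T+1)) hfreeP
    conv_rhs => rw [← hdec, hpre, hSx, hdec]
  | some u =>
    have hvq : pqIdx x cs (p+T+1) = ((p+T+1+u : Nat) : Int) := by unfold pqIdx; rw [hdropPT, hg]
    obtain ⟨y, hdec2, hlen2, hy2, hfree2⟩ := pq_fi_some_split hg
    have hu : u < ((cs.drop p).drop (T+1)).length := by
      have hlen3 := congrArg List.length hdec2
      rw [List.length_append, hlen2, List.length_cons] at hlen3
      omega
    have haalen : ((cs.drop p).drop (T+1)).length = cs.length - (p+T+1) := by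
      rw [List.length_drop, List.length_drop]
      omega
    have hne : ¬ (((p+T+1+u : Nat) : Int) = -1) := by
      intro h5
      omega
    rw [hvq, if_neg hne]
    have hcast2 : (((p+T+1+u : Nat) : Int)+1) = ((p+T+1+u+1 : Nat) : Int) := by push_cast; ring
    have hp2 : p + T + 1 + u + 1 ≤ cs.length := by omega
    have htn : ((((p+T+1+u : Nat) : Int))+1).toNat = p+T+1+u+1 := by omega
    rw [htn]
    rw [IH (p+T+1+u+1) i1' i2' _ hp2 (by omega) ⟨p, by omega, h1⟩ ⟨p, by omega, h2⟩]
    have hsl1 : PySem.List.slice cs (some ((p : Nat) : Int)) (some ((p+T : Nat) : Int))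
        = (cs.drop p).take T := by
      rw [PySem.List.slice_natCast]
      congr 1
      omega
    have hsl2 : PySem.List.slice cs (some ((p+T+1 : Nat) : Int)) (some ((p+T+1+u : Nat) : Int))
        = ((cs.drop p).drop (T+1)).take u := by
      rw [PySem.List.slice_natCast, hdropPT]
      congr 1
      omega
    rw [hsl1, hsl2]
    have hdrop2 : cs.drop (p+T+1+u+1) = ((cs.drop p).drop (T+1)).drop (u+1) := by
      rw [List.drop_drop, List.drop_drop]
      congr 1
      omega
    rw [hdrop2]
    have hfs : pqFindSplit x ((cs.drop p).drop (T+1))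
        = some (((cs.drop p).drop (T+1)).take u, ((cs.drop p).drop (T+1)).drop (u+1)) := by
      rw [pq_findSplit_eq, hg]
    have hSx := pq_S_quote_some nc x ((cs.drop p).drop (T+1))
      (((cs.drop p).drop (T+1)).take u) (((cs.drop p).drop (T+1)).drop (u+1)) hq hfs
    have hpre := pq_S_prefix nc ((cs.drop p).take T) (x :: (cs.drop p).drop (T+1)) hfreeP
    conv_rhs => rw [← hdec, hpre, hSx]
    simp [List.append_assoc]

theorem pqRun_eq (cs nc : List Char) : ∀ (fuel p : Nat) (i1 i2 : Int) (parts : List (List Char)),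
    p ≤ cs.length → cs.length + 1 - p ≤ fuel →
    (∃ s, s ≤ p ∧ i1 = pqIdx '"' cs s) → (∃ s, s ≤ p ∧ i2 = pqIdx '\'' cs s) →
    pqRun cs nc fuel p i1 i2 parts = parts.flatten ++ pqS nc (cs.drop p) := by
  intro fuel
  induction fuel with
  | zero =>
    intro p i1 i2 parts hp hfuel _ _
    omega
  | succ fuel ih =>
    intro p i1 i2 parts hp hfuel hc1 hc2
    have h1 := pq_refresh '"' cs p i1 hp hc1
    have h2 := pq_refresh '\'' cs p i2 hp hc2
    rw [pqRun]
    rw [h1, h2]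
    have hor := pq_fi_or (cs.drop p)
    cases hf1 : List.findIdx? (fun x => x == '"') (cs.drop p) with
    | none =>
      cases hf2 : List.findIdx? (fun x => x == '\'') (cs.drop p) with
      | none =>
        rw [hf1, hf2] at hor
        simp only [pqIdx, hf1, hf2]
        simp only [List.filter, bne_self_eq_false, Bool.false_and]
        have hquotefree : ∀ y ∈ cs.drop p, ¬ (y = '"' ∨ y = '\'') := by
          rw [List.findIdx?_eq_none_iff] at hor
          intro y hy
          have := hor y hy
          simp at this
          tauto
        have hS : pqS nc (cs.drop p) = cs.drop p := by
          have h3 := pq_S_prefix nc (cs.drop p) [] hquotefree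
          simpa [pqS, pq_chunks_nil] using h3
        rw [pq_join_nil_eq_flatten, PySem.List.slice_from_natCast, hS]
        simp [PySem.List.min?]
      | some u =>
        rw [hf1, hf2] at hor
        simp only [pqIdx, hf1, hf2]
        have hne : ((((p+u : Nat) : Int)) != -1) = true := by
          simp [bne]
          omega
        simp only [List.filter, hne, bne_self_eq_false]
        have hmin : PySem.List.min? [((p+u : Nat) : Int)] (fun k => k) = some ((p+u : Nat) : Int) := by
          simp [PySem.List.min?]
        rw [hmin]
        exact pq_step_some cs nc fuel p parts _ _ u hp hfuel hor
          (by simp [pqIdx, hf1]) (by simp [pqIdx, hf2]) ih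
    | some t =>
      cases hf2 : List.findIdx? (fun x => x == '\'') (cs.drop p) with
      | none =>
        rw [hf1, hf2] at hor
        simp only [pqIdx, hf1, hf2]
        have hne : ((((p+t : Nat) : Int)) != -1) = true := by
          simp [bne]
          omega
        simp only [List.filter, hne, bne_self_eq_false]
        have hmin : PySem.List.min? [((p+t : Nat) : Int)] (fun k => k) = some ((p+t : Nat) : Int) := by
          simp [PySem.List.min?]
        rw [hmin]
        exact pq_step_some cs nc fuel p parts _ _ t hp hfuel hor
          (by simp [pqIdx, hf1]) (by simp [pqIdx, hf2]) ih
      | some u =>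
        rw [hf1, hf2] at hor
        simp only [pqIdx, hf1, hf2]
        have hne1 : ((((p+t : Nat) : Int)) != -1) = true := by
          simp [bne]
          omega
        have hne2 : ((((p+u : Nat) : Int)) != -1) = true := by
          simp [bne]
          omega
        simp only [List.filter, hne1, hne2]
        have hmin : PySem.List.min? [((p+t : Nat) : Int), ((p+u : Nat) : Int)] (fun k => k)
            = some ((p + min t u : Nat) : Int) := by
          simp [PySem.List.min?]
          split_ifs with h5
          · congr 1
            push_cast at h5 ⊢
            omega
          · congr 1
            push_cast at h5 ⊢
            omega
        rw [hmin]
        exact pq_step_some cs nc fuel p parts _ _ (min t u) hp hfuel hor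
          (by simp [pqIdx, hf1]) (by simp [pqIdx, hf2]) ih

-- ===== VERDICT (by name: the statement is the Claim_ definition above) =====
theorem ParseQuote_spec : Claim_equal_ParseQuote := by
  intro l newchar _
  unfold Spec_ParseQuote ParseQuote ParseQuote_alt
  have hA := (pq_loop_inv newchar.toList l.toList.length).1 l.toList [] 0 (le_refl _)
  simp only [List.length_nil, List.nil_append] at hA
  have hB := pqRun_eq l.toList newchar.toList (l.toList.length + 1) 0
      (PySem.Chars.find l.toList ['"']) (PySem.Chars.find l.toList ['\'']) []
      (Nat.zero_le _) (by omega)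
      ⟨0, le_refl 0, pq_find_eq_pqIdx l.toList '"'⟩
      ⟨0, le_refl 0, pq_find_eq_pqIdx l.toList '\''⟩
  rw [show (List.map (fun c => [c]) l.toList) = List.map pqSing l.toList from rfl, hA, hB]
  simp [pq_join_nil_eq_flatten, pqS]
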